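-- pv_equiv track=rewrite | github.com/waferenak275-max/Asta-Neural | engine/thought.py | _extract_step_block
-- ===== SOURCE A (Python) =====
-- def _extract_step_block(raw: str, header: str, next_headers: tuple[str, ...]) -> str:
--     start = raw.find(header)
--     if start == -1:
--         return raw
--     start += len(header)
--     end = len(raw)
--     for next_header in next_headers:
--         pos = raw.find(next_header, start)
--         if pos != -1 and pos < end:
--             end = pos
--     return raw[start:end].strip()
-- ===== SOURCE B (Python) =====
-- # B: one left-to-right scan for the first position where any next_header starts,
-- # instead of A's per-header find with a running minimum.
-- def _extract_step_block(raw: str, header: str, next_headers: tuple[str, ...]) -> str: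
--     start = raw.find(header)
--     if start == -1:
--         return raw
--     start += len(header)
--     end = len(raw)
--     for p in range(start, len(raw) + 1):
--         if any(raw.startswith(h, p) for h in next_headers):
--             end = p
--             break
--     return raw[start:end].strip()
-- ===== Notes on version B (the rewrite author's own statement) =====
-- stated objective: alternative
-- what changed: Replaces the per-header find loop that keeps a running minimum with a single left-to-right positional scan that stops at the first position where any next_header starts (startswith + break).
import Mathlib
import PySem

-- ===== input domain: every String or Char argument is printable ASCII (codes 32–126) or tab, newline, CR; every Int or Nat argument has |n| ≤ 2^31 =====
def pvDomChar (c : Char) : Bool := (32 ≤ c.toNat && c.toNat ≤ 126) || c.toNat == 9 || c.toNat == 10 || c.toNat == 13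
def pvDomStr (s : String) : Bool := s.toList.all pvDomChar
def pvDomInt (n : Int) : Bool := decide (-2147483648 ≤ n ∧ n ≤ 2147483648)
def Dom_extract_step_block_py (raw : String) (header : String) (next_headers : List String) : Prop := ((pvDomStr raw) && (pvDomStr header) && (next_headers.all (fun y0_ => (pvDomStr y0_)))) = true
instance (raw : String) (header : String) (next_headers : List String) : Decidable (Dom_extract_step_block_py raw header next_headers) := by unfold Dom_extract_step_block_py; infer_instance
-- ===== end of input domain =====

-- B replaces A's per-header find loop (running minimum of first occurrences) by one
-- left-to-right positional scan stopping at the first position where any next_header starts;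
-- same results, a genuinely different traversal (objective: alternative).

-- ===== PORT A =====
def extract_step_block_py (raw : String) (header : String) (next_headers : List String) : String :=
  let s := raw.toList
  let start := PySem.Chars.find s header.toList
  if start = -1 then raw
  else
    let start := start + header.toList.length
    let e := next_headers.foldl (fun e nh =>
      let pos := PySem.Chars.findFrom s nh.toList start none
      if pos ≠ -1 ∧ pos < e then pos else e) ((PySem.Chars.len s : Int))
    String.ofList (PySem.Chars.strip (PySem.Chars.slice s (some start) (some e)))

-- ===== PORT B =====
-- raw.startswith(h, p) is ported as startswith on s.drop p.toNat — exact since in the loop 0 ≤ p ≤ len(raw);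
-- the for-with-break is ported as find? over the range.
def extract_step_block_py_alt (raw : String) (header : String) (next_headers : List String) : String :=
  let s := raw.toList
  let start := PySem.Chars.find s header.toList
  if start = -1 then raw
  else
    let st := start + header.toList.length
    let e : Int := match (PySem.List.pyRange st ((PySem.Chars.len s : Int) + 1) 1).find?
        (fun p => next_headers.any (fun h => PySem.Chars.startswith (s.drop p.toNat) h.toList)) with
      | some p => p
      | none => (PySem.Chars.len s : Int)
    String.ofList (PySem.Chars.strip (PySem.Chars.slice s (some st) (some e)))

-- ===== PRECONDITION & SPEC =====
def Spec_extract_step_block_py (raw : String) (header : String) (next_headers : List String) (out : String) : Prop := out = extract_step_block_py_alt raw header next_headers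
instance (raw : String) (header : String) (next_headers : List String) (out : String) : Decidable (Spec_extract_step_block_py raw header next_headers out) := by unfold Spec_extract_step_block_py; infer_instance

-- ===== CLAIM (what is proved, stated in full; the proofs are below) =====
def Claim_equal_extract_step_block_py : Prop := ∀ (raw : String) (header : String) (next_headers : List String), Dom_extract_step_block_py raw header next_headers → Spec_extract_step_block_py raw header next_headers (extract_step_block_py raw header next_headers)

-- ===== LEMMAS AND PROOFS =====

-- "e is the first position ≥ st at which some header of hs starts (or len if none)".
def FirstSpec (s : List Char) (hs : List String) (st : Nat) (e : Int) : Prop :=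
  (st : Int) ≤ e ∧ e ≤ (s.length : Int) ∧
  (e = (s.length : Int) ∨ ∃ h ∈ hs, h.toList <+: s.drop e.toNat) ∧
  (∀ q : Nat, st ≤ q → (q : Int) < e → ∀ h ∈ hs, ¬ h.toList <+: s.drop q)

-- A match of h at position q ≥ st is an occurrence of h in s.drop st.
lemma infix_of_prefix_drop (s : List Char) (h : List Char) (st q : Nat) (hq : st ≤ q)
    (hp : h <+: s.drop q) : h <:+: s.drop st := by
  have : s.drop q = (s.drop st).drop (q - st) := by
    rw [List.drop_drop]; congr 1; omega
  rw [this] at hp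
  exact hp.isInfix.trans (List.drop_suffix _ _).isInfix

-- find? on a strictly increasing list returns the first (smallest) satisfying element.
lemma find?_sorted_first {f : Int → Bool} {l : List Int} (hl : l.Pairwise (· < ·)) {x : Int}
    (h : l.find? f = some x) : ∀ y ∈ l, y < x → f y = false := by
  induction l with
  | nil => simp at h
  | cons a l ih =>
    intro y hy hyx
    by_cases hfa : f a
    · simp only [List.find?_cons, hfa] at h
      cases h
      rcases List.mem_cons.mp hy with rfl | hy
      · omega
      · exact absurd (List.rel_of_pairwise_cons hl hy) (by omega)
    · simp only [List.find?_cons, hfa] at h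
      rcases List.mem_cons.mp hy with rfl | hy
      · exact Bool.eq_false_iff.mpr hfa
      · exact ih hl.of_cons h y hy hyx

-- Characterization of A's loop result (running minimum of first occurrences ≥ st).
lemma foldA_spec (s : List Char) (st : Nat) (hk : st ≤ s.length) :
    ∀ (hs : List String) (e : Int), (st : Int) ≤ e → e ≤ (s.length : Int) →
    ((st : Int) ≤ (hs.foldl (fun e nh =>
        let pos := PySem.Chars.findFrom s nh.toList (st : Int) none
        if pos ≠ -1 ∧ pos < e then pos else e) e) ∧
     (hs.foldl (fun e nh =>
        let pos := PySem.Chars.findFrom s nh.toList (st : Int) none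
        if pos ≠ -1 ∧ pos < e then pos else e) e) ≤ e ∧
     ((hs.foldl (fun e nh =>
        let pos := PySem.Chars.findFrom s nh.toList (st : Int) none
        if pos ≠ -1 ∧ pos < e then pos else e) e) = e ∨
       ∃ h ∈ hs, h.toList <+: s.drop (hs.foldl (fun e nh =>
        let pos := PySem.Chars.findFrom s nh.toList (st : Int) none
        if pos ≠ -1 ∧ pos < e then pos else e) e).toNat) ∧
     (∀ q : Nat, st ≤ q → (q : Int) < (hs.foldl (fun e nh =>
        let pos := PySem.Chars.findFrom s nh.toList (st : Int) none
        if pos ≠ -1 ∧ pos < e then pos else e) e) →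
       ∀ h ∈ hs, ¬ h.toList <+: s.drop q)) := by
  intro hs
  induction hs with
  | nil => intro e he1 he2; simp [he1]
  | cons nh rest ih =>
    intro e he1 he2
    simp only [List.foldl_cons]
    set pos := PySem.Chars.findFrom s nh.toList (st : Int) none with hpos
    by_cases hcond : pos ≠ -1 ∧ pos < e
    · -- e1 = pos
      have hspec := PySem.Chars.findFrom_natCast_spec s nh.toList st hk hcond.1
      rw [← hpos] at hspec
      have h1 : (st : Int) ≤ pos := hspec.1
      have h2 : pos ≤ e := le_of_lt hcond.2
      obtain ⟨hA, hB, hC, hD⟩ := ih pos h1 (le_trans h2 he2)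
      rw [if_pos hcond]
      refine ⟨hA, le_trans hB h2, ?_, ?_⟩
      · rcases hC with hC | ⟨h, hh, hp⟩
        · exact Or.inr ⟨nh, by simp, by rw [hC]; exact hspec.2.1⟩
        · exact Or.inr ⟨h, by simp [hh], hp⟩
      · intro q hq1 hq2 h hh
        rcases List.mem_cons.mp hh with rfl | hh
        · have hqp : (q : Int) < pos := lt_of_lt_of_le hq2 hB
          have hqpos : q < pos.toNat := by omega
          exact hspec.2.2 q hq1 hqpos
        · exact hD q hq1 hq2 h hh
    · -- e1 = e
      rw [if_neg hcond]
      obtain ⟨hA, hB, hC, hD⟩ := ih e he1 he2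
      refine ⟨hA, hB, ?_, ?_⟩
      · rcases hC with hC | ⟨h, hh, hp⟩
        · exact Or.inl hC
        · exact Or.inr ⟨h, by simp [hh], hp⟩
      · intro q hq1 hq2 h hh
        rcases List.mem_cons.mp hh with rfl | hh
        · -- nh was not taken: either absent after st, or its first occurrence is ≥ e
          intro hp
          by_cases habs : pos = -1
          · have : ¬ h.toList <:+: s.drop st := by
              have := (PySem.Chars.findFrom_natCast_eq_neg_one_iff s h.toList st hk).mp
                (by rw [← hpos]; exact habs)
              exact this
            exact this (infix_of_prefix_drop s h.toList st q hq1 hp)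
          · have hspec := PySem.Chars.findFrom_natCast_spec s h.toList st hk habs
            rw [← hpos] at hspec
            have hpe : e ≤ pos := by
              by_contra hlt
              exact hcond ⟨habs, by omega⟩
            have hqe : (q : Int) < e := lt_of_lt_of_le hq2 hB
            have hqpos : q < pos.toNat := by
              have h0 : (st : Int) ≤ pos := hspec.1
              omega
            exact hspec.2.2 q hq1 hqpos hp
        · exact hD q hq1 hq2 h hh

-- Characterization of B's scan result (first position ≥ st where some header starts).
lemma findB_spec (s : List Char) (hs : List String) (st : Nat) (hn : st ≤ s.length) :
    FirstSpec s hs st (match (PySem.List.pyRange (st : Int) ((s.length : Int) + 1) 1).find?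
        (fun p => hs.any (fun h => PySem.Chars.startswith (s.drop p.toNat) h.toList)) with
      | some p => p
      | none => ((s.length : Int))) := by
  set f : Int → Bool := fun p => hs.any (fun h => PySem.Chars.startswith (s.drop p.toNat) h.toList) with hf
  have hfq : ∀ q : Nat, f (q : Int) = true ↔ ∃ h ∈ hs, h.toList <+: s.drop q := by
    intro q
    simp only [hf, List.any_eq_true]
    constructor
    · rintro ⟨h, hh, hsw⟩
      exact ⟨h, hh, (PySem.Chars.startswith_iff _ _).mp (by simpa using hsw)⟩
    · rintro ⟨h, hh, hp⟩
      exact ⟨h, hh, by simpa using (PySem.Chars.startswith_iff _ _).mpr hp⟩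
  cases hfind : (PySem.List.pyRange (st : Int) ((s.length : Int) + 1) 1).find? f with
  | none =>
    have hnone := List.find?_eq_none.mp hfind
    refine ⟨by simpa using hn, le_refl _, Or.inl rfl, ?_⟩
    intro q hq1 hq2 h hh hp
    have hq2' : (q : Int) < (s.length : Int) := hq2
    have hmem : (q : Int) ∈ PySem.List.pyRange (st : Int) ((s.length : Int) + 1) 1 :=
      (PySem.List.mem_pyRange_one).mpr (by omega)
    exact absurd ((hfq q).mpr ⟨h, hh, hp⟩) (by simpa using hnone _ hmem)
  | some p =>
    have hmem : p ∈ PySem.List.pyRange (st : Int) ((s.length : Int) + 1) 1 :=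
      List.mem_of_find?_eq_some hfind
    have hbounds := (PySem.List.mem_pyRange_one).mp hmem
    have hfp : f p = true := List.find?_some hfind
    have hp1 : (st : Int) ≤ p := hbounds.1
    have hp2 : p ≤ (s.length : Int) := by omega
    have hpnat : p = ((p.toNat : Nat) : Int) := by omega
    refine ⟨hp1, hp2, Or.inr ?_, ?_⟩
    · exact (hfq p.toNat).mp (by rwa [← hpnat])
    · intro q hq1 hq2 h hh hp
      have hq2' : (q : Int) < p := hq2
      have hmemq : (q : Int) ∈ PySem.List.pyRange (st : Int) ((s.length : Int) + 1) 1 :=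
        (PySem.List.mem_pyRange_one).mpr (by omega)
      have := find?_sorted_first (PySem.List.pairwise_lt_pyRange_one _ _) hfind (q : Int) hmemq hq2'
      exact absurd ((hfq q).mpr ⟨h, hh, hp⟩) (by simp [this])

-- The two characterizations pin down the same value.
lemma first_unique (s : List Char) (hs : List String) (st : Nat) (eA eB : Int)
    (hA : FirstSpec s hs st eA) (hB : FirstSpec s hs st eB) : eA = eB := by
  obtain ⟨hA1, hA2, hA3, hA4⟩ := hA
  obtain ⟨hB1, hB2, hB3, hB4⟩ := hB
  by_contra hne
  rcases lt_or_gt_of_ne hne with hlt | hlt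
  · rcases hA3 with h | ⟨h, hh, hp⟩
    · omega
    · exact hB4 eA.toNat (by omega) (by omega) h hh hp
  · rcases hB3 with h | ⟨h, hh, hp⟩
    · omega
    · exact hA4 eB.toNat (by omega) (by omega) h hh hp

-- ===== VERDICT (by name: the statement is the Claim_ definition above) =====
theorem extract_step_block_py_spec : Claim_equal_extract_step_block_py := by
  intro raw header next_headers _
  unfold Spec_extract_step_block_py
  simp only [extract_step_block_py, extract_step_block_py_alt]
  by_cases h0 : PySem.Chars.find raw.toList header.toList = -1
  · simp only [if_pos h0]
  · simp only [if_neg h0]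
    set s := raw.toList with hsdef
    set fd := PySem.Chars.find s header.toList with hfd
    have hge : 0 ≤ fd := by
      have := PySem.Chars.neg_one_le_find s header.toList
      rw [← hfd] at this
      rcases lt_or_eq_of_le this with h | h
      · omega
      · exact absurd h.symm h0
    have hspec := PySem.Chars.find_spec (s := s) (sub := header.toList) (by rw [← hfd]; omega)
    rw [← hfd] at hspec
    have hlenp : header.toList.length ≤ (s.drop fd.toNat).length := hspec.1.length_le
    have hdl : (s.drop fd.toNat).length = s.length - fd.toNat := by simp
    have hfl : fd ≤ s.length := PySem.Chars.find_le_length s header.toList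
    set k : Nat := (fd + (header.toList.length : Int)).toNat with hk
    have hcast : fd + (header.toList.length : Int) = (k : Int) := by omega
    have hkle : k ≤ s.length := by omega
    have hA := foldA_spec s k hkle next_headers ((s.length : Int)) (by omega) le_rfl
    have hB := findB_spec s next_headers k hkle
    have heq := first_unique s next_headers k _ _
      ⟨hA.1, hA.2.1, hA.2.2.1.imp id id, hA.2.2.2⟩ hB
    simp only [PySem.Chars.len_eq, hcast, heq]
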